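-- pv_equiv track=rewrite | github.com/pypi-data/pypi-mirror-403 | packages/crisscross-kit/crisscross_kit-1.2.2-cp313-cp313-win_amd64.whl/crisscross/scripts/plate_handling/new_handle_library_generation/new_handle_library_quick_checks.py | count_kmer_repeats
-- ===== SOURCE A (Python) =====
-- from collections import Counter
--
-- def count_kmer_repeats(sequences, k):
--     kmer_counts = Counter()
--
--     for sequence in sequences:
--         for i in range(len(sequence) - k + 1):
--             kmer = sequence[i:i + k]
--             kmer_counts[kmer] += 1
--
--     repeated_kmers = {kmer: count for kmer, count in kmer_counts.items() if count > 1}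
--     return repeated_kmers
-- ===== SOURCE B (Python) =====
-- def _bisect_pos(uniq, km):
--     # standard binary search: leftmost position of km in the sorted list uniq
--     lo, hi = 0, len(uniq)
--     while lo < hi:
--         mid = (lo + hi) // 2
--         if uniq[mid] < km:
--             lo = mid + 1
--         else:
--             hi = mid
--     return lo
--
-- def count_kmer_repeats(sequences, k):
--     # No hash-based counting: build the sorted array of distinct k-mers, count
--     # occurrences into a parallel array addressed by binary search, then emit
--     # each repeated k-mer once, at its first occurrence, in a guarded pass.
--     kmers = [s[i:i + k] for s in sequences for i in range(len(s) - k + 1)]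
--     uniq = sorted(set(kmers))
--     counts = [0] * len(uniq)
--     for km in kmers:
--         counts[_bisect_pos(uniq, km)] += 1
--     result = {}
--     for km in kmers:
--         c = counts[_bisect_pos(uniq, km)]
--         if c > 1 and km not in result:
--             result[km] = c
--     return result
-- ===== Notes on version B (the rewrite author's own statement) =====
-- stated objective: alternative
-- what changed: Replaces Counter's hash-based counting with a sorted array of distinct k-mers, a parallel count array addressed by hand-written binary search, and a final guarded pass that emits each repeated k-mer once at its first occurrence.
import Mathlib
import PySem

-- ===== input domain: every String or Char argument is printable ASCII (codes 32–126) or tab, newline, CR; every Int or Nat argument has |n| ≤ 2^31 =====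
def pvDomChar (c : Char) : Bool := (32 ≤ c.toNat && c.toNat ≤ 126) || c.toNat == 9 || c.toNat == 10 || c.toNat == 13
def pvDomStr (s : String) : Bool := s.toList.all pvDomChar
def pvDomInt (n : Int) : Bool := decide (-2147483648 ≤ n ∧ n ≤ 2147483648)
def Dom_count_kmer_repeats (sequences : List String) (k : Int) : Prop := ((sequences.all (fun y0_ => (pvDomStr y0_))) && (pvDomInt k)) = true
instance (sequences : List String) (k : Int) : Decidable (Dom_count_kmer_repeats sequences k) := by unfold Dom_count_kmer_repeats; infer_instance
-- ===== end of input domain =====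

-- B replaces A's Counter-based hash counting with a sorted distinct-k-mer array, binary-search-indexed count array, and a guarded emission pass (alternative algorithm, same results).


-- ===== PORT A =====
def count_kmer_repeats (sequences : List String) (k : Int) : List (String × Int) :=
  let kmer_counts : PySem.Dict String Int :=
    sequences.foldl (fun d sequence =>
      (PySem.List.pyRange 0 (PySem.Str.len sequence - k + 1) 1).foldl
        (fun d i => d.modify (PySem.Str.slice sequence (some i) (some (i + k))) 0 (· + 1)) d)
      PySem.Dict.empty
  (kmer_counts.items.foldl
    (fun d p => if p.2 > 1 then d.insert p.1 p.2 else d) PySem.Dict.empty).items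

-- ===== PORT B =====
-- the 'while lo < hi' loop of _bisect_pos, step for step ('//' is PySem.Int.floordiv;
-- uniq[mid] is in range whenever 0 ≤ lo and hi ≤ len(uniq), so pyGetD is exact there)
def pvBisectLoop (uniq : List String) (km : String) (lo hi : Int) : Int :=
  if lo < hi then
    let mid := PySem.Int.floordiv (lo + hi) 2
    if PySem.List.pyGetD uniq mid "" < km then pvBisectLoop uniq km (mid + 1) hi
    else pvBisectLoop uniq km lo mid
  else lo
  termination_by (hi - lo).toNat
  decreasing_by
  · have hb := PySem.Int.floordiv_two_mid_bounds (le_of_lt (by assumption : lo < hi))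
    omega
  · have hlt : PySem.Int.floordiv (lo + hi) 2 < hi :=
      (PySem.Int.floordiv_lt_iff_lt_mul (by norm_num)).mpr (by omega)
    omega

def pvBisectPos (uniq : List String) (km : String) : Int :=
  pvBisectLoop uniq km 0 (uniq.length : Int)

def count_kmer_repeats_alt (sequences : List String) (k : Int) : List (String × Int) :=
  let kmers : List String :=
    sequences.flatMap (fun s =>
      (PySem.List.pyRange 0 (PySem.Str.len s - k + 1) 1).map
        (fun i => PySem.Str.slice s (some i) (some (i + k))))
  let uniq := PySem.List.sorted (PySem.Set.ofList kmers) (fun km => km)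
  let counts0 := PySem.List.pyRepeat [(0 : Int)] (uniq.length : Int)
  -- counts[_bisect_pos(uniq, km)] += 1 : the index is in range (0 ≤ j < len(uniq)),
  -- so the read (pyGetD) and the write (List.set at j.toNat) are exact
  let counts := kmers.foldl (fun cnts km =>
      let j := pvBisectPos uniq km
      cnts.set j.toNat (PySem.List.pyGetD cnts j 0 + 1)) counts0
  (kmers.foldl (fun d km =>
      let c := PySem.List.pyGetD counts (pvBisectPos uniq km) 0
      if c > 1 ∧ d.contains km = false then d.insert km c else d)
    (PySem.Dict.empty : PySem.Dict String Int)).items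

-- ===== PRECONDITION & SPEC =====
def Spec_count_kmer_repeats (sequences : List String) (k : Int) (out : List (String × Int)) : Prop := out = count_kmer_repeats_alt sequences k
instance (sequences : List String) (k : Int) (out : List (String × Int)) : Decidable (Spec_count_kmer_repeats sequences k out) := by unfold Spec_count_kmer_repeats; infer_instance

-- ===== CLAIM =====
def Claim_equal_count_kmer_repeats : Prop := ∀ (sequences : List String) (k : Int), Dom_count_kmer_repeats sequences k → Spec_count_kmer_repeats sequences k (count_kmer_repeats sequences k)

-- ===== LEMMAS AND PROOFS =====

-- A's nested counting loop builds exactly Counter(kmers) for the flattened k-mer list.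
theorem count_kmer_counts_eq_counter (sequences : List String) (k : Int) :
    (sequences.foldl (fun d sequence =>
      (PySem.List.pyRange 0 (PySem.Str.len sequence - k + 1) 1).foldl
        (fun d i => d.modify (PySem.Str.slice sequence (some i) (some (i + k))) 0 (· + 1)) d)
      (PySem.Dict.empty (κ := String) (ν := Int)))
    = PySem.Dict.counter (sequences.flatMap (fun s =>
        (PySem.List.pyRange 0 (PySem.Str.len s - k + 1) 1).map
          (fun i => PySem.Str.slice s (some i) (some (i + k))))) := by
  rw [PySem.Dict.counter_eq_foldl, List.foldl_flatMap]
  apply PySem.List.foldl_congr_mem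
  intro d s _
  rw [List.foldl_map]

-- Filtering Counter(kmers).items for count > 1 into a fresh dict yields the filtered map over the distinct k-mers.
theorem counter_items_filter_gt_one (kmers : List String) :
    (((PySem.Dict.counter kmers).items).foldl
      (fun d p => if p.2 > 1 then d.insert p.1 p.2 else d)
      (PySem.Dict.empty (κ := String) (ν := Int))).items
    = ((PySem.Set.ofList kmers).filter (fun km => decide ((kmers.count km : Int) > 1))).map
        (fun km => (km, (kmers.count km : Int))) := by
  rw [PySem.Dict.items_counter,
      PySem.List.foldl_ite_eq_foldl_filter (p := fun p : String × Int => p.2 > 1)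
        (f := fun d p => d.insert p.1 p.2) _ PySem.Dict.empty,
      List.filter_map, List.foldl_map]
  rw [PySem.Dict.items_foldl_insert_fresh _ (fun km => km) (fun km => (kmers.count km : Int)) _
      (by intro a _; simp [PySem.Dict.contains_empty])
      (by simpa using (PySem.Set.nodup_ofList kmers).filter _)]
  simp only [List.nil_append, PySem.Dict.empty]
  rfl

-- binary search on a strictly increasing list finds the (unique) position of a member
theorem pvBisectLoop_spec (uniq : List String) (km : String)
    (hU : uniq.Pairwise (· < ·)) (j : Nat) (hj : j < uniq.length) (hkm : uniq[j] = km) :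
    ∀ (n : Nat) (lo hi : Int), (hi - lo).toNat = n → 0 ≤ lo → lo ≤ (j : Int) →
      (j : Int) ≤ hi → hi ≤ (uniq.length : Int) → pvBisectLoop uniq km lo hi = (j : Int) := by
  have hmono : ∀ (p q : Nat) (hp : p < uniq.length) (hq : q < uniq.length),
      p < q → uniq[p] < uniq[q] := by
    intro p q hp hq hpq
    exact (List.pairwise_iff_getElem.mp hU) p q hp hq hpq
  intro n
  induction n using Nat.strong_induction_on with
  | _ n ihn =>
    intro lo hi hn h0 hlo hhi hlen
    rw [pvBisectLoop]
    by_cases hlt : lo < hi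
    · rw [if_pos hlt]
      have hb := PySem.Int.floordiv_two_mid_bounds (le_of_lt hlt)
      have hmidlt : PySem.Int.floordiv (lo + hi) 2 < hi :=
        (PySem.Int.floordiv_lt_iff_lt_mul (by norm_num)).mpr (by omega)
      set mid := PySem.Int.floordiv (lo + hi) 2 with hmid_def
      have hmid0 : 0 ≤ mid := le_trans h0 hb.1
      have hmidlen : mid < (uniq.length : Int) := lt_of_lt_of_le hmidlt hlen
      have hget := PySem.List.pyGetD_eq_getElem uniq "" (i := mid) hmid0
        (by simpa using hmidlen)
      by_cases hcmp : PySem.List.pyGetD uniq mid "" < km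
      · rw [if_pos hcmp]
        have hmj : mid.toNat < j := by
          by_contra hge'
          have hge : j ≤ mid.toNat := by omega
          rcases Nat.lt_or_ge j mid.toNat with hjm | hjm
          · have := hmono j mid.toNat hj (by omega) hjm
            rw [hget, ← hkm] at hcmp
            exact absurd hcmp (not_lt_of_gt this)
          · have hje : j = mid.toNat := le_antisymm hge hjm
            have heq : uniq[mid.toNat]'(by omega) = uniq[j] := by
              congr 1
              omega
            rw [hget, heq, hkm] at hcmp
            exact absurd hcmp (lt_irrefl _)
        exact ihn (hi - (mid + 1)).toNat (by omega) (mid + 1) hi rfl (by omega) (by omega) hhi hlen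
      · rw [if_neg hcmp]
        have hjm : (j : Int) ≤ mid := by
          by_contra hgt'
          have hgt : mid < (j : Int) := by omega
          have : uniq[mid.toNat]'(by omega) < uniq[j] := hmono mid.toNat j (by omega) hj (by omega)
          rw [hkm] at this
          rw [hget] at hcmp
          exact hcmp this
        exact ihn (mid - lo).toNat (by omega) lo mid rfl h0 hlo hjm (by omega)
    · rw [if_neg hlt]
      omega

theorem pvBisectPos_spec (uniq : List String) (km : String)
    (hU : uniq.Pairwise (· < ·)) (hmem : km ∈ uniq) :
    ∃ (j : Nat) (hj : j < uniq.length), pvBisectPos uniq km = (j : Int) ∧ uniq[j] = km := by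
  rcases List.mem_iff_getElem.mp hmem with ⟨j, hj, hkm⟩
  exact ⟨j, hj, pvBisectLoop_spec uniq km hU j hj hkm _ 0 (uniq.length : Int) rfl
    (le_refl 0) (by exact_mod_cast Nat.zero_le j) (by exact_mod_cast le_of_lt hj)
    (le_refl _), hkm⟩

-- the counting pass turns the zero array into the per-distinct-k-mer multiplicities
theorem phase1 (U : List String) (hU : U.Pairwise (· < ·)) :
    ∀ (l : List String), (∀ km ∈ l, km ∈ U) → ∀ (g : String → Int),
    l.foldl (fun cnts km =>
        let j := pvBisectPos U km
        cnts.set j.toNat (PySem.List.pyGetD cnts j 0 + 1)) (U.map g)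
    = U.map (fun u => g u + (l.count u : Int)) := by
  intro l
  induction l with
  | nil =>
    intro _ g
    simp
  | cons km t ih =>
    intro hl g
    rcases pvBisectPos_spec U km hU (hl km (by simp)) with ⟨j, hj, hjeq, hjval⟩
    have hstep : (U.map g).set (pvBisectPos U km).toNat
        (PySem.List.pyGetD (U.map g) (pvBisectPos U km) 0 + 1)
        = U.map (fun u => if u = km then g u + 1 else g u) := by
      rw [hjeq]
      have hread : PySem.List.pyGetD (U.map g) ((j : Nat) : Int) 0 = g U[j] := by
        rw [PySem.List.pyGetD_natCast, List.getD_eq_getElem _ _ (by simpa using hj)]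
        simp
      rw [hread, Int.toNat_natCast]
      apply List.ext_getElem
      · simp
      · intro p hp hp'
        simp only [List.getElem_set, List.getElem_map] at hp ⊢
        have hpU : p < U.length := by simpa using hp'
        by_cases hpj : p = j
        · subst hpj
          rw [if_pos rfl, if_pos (by rw [hjval]), hjval]
        · rw [if_neg (fun h => hpj h.symm)]
          have hne : U[p] ≠ km := by
            rw [← hjval]
            intro heq
            rcases Nat.lt_or_ge p j with hpq | hpq
            · exact absurd heq (ne_of_lt ((List.pairwise_iff_getElem.mp hU) p j hpU hj hpq))
            · have : j < p := lt_of_le_of_ne hpq (fun h => hpj h.symm)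
              exact absurd heq.symm (ne_of_lt ((List.pairwise_iff_getElem.mp hU) j p hj hpU this))
          rw [if_neg hne]
    show List.foldl _ ((U.map g).set (pvBisectPos U km).toNat
        (PySem.List.pyGetD (U.map g) (pvBisectPos U km) 0 + 1)) t = _
    rw [hstep, ih (fun y hy => hl y (by simp [hy]))]
    apply List.map_congr_left
    intro u _
    by_cases hu : u = km
    · subst hu
      rw [if_pos rfl, List.count_cons_self]
      push_cast
      ring
    · rw [if_neg hu, List.count_cons_of_ne (fun h => hu h.symm)]

-- the guarded emission pass builds, dict-wise, the first-occurrence filtered map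
theorem phase2 (v : String → Int) :
    ∀ (l P : List String),
    l.foldl (fun d km => if v km > 1 ∧ d.contains km = false then d.insert km (v km) else d)
      (((PySem.Set.ofList P).filter (fun km => decide (v km > 1))).foldl
        (fun d km => d.insert km (v km)) (PySem.Dict.empty : PySem.Dict String Int))
    = ((PySem.Set.ofList (P ++ l)).filter (fun km => decide (v km > 1))).foldl
        (fun d km => d.insert km (v km)) (PySem.Dict.empty : PySem.Dict String Int) := by
  intro l
  induction l with
  | nil =>
    intro P
    rw [List.append_nil, List.foldl_nil]
  | cons km t ih =>
    intro P
    rw [List.foldl_cons]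
    have hkeys : (((PySem.Set.ofList P).filter (fun km => decide (v km > 1))).foldl
        (fun d km => d.insert km (v km)) (PySem.Dict.empty : PySem.Dict String Int)).keys
        = (PySem.Set.ofList P).filter (fun km => decide (v km > 1)) := by
      rw [PySem.Dict.keys_foldl_insert_key _ (fun km => km) (fun d km => v km) _]
      rw [PySem.Dict.keys_empty, List.map_id', PySem.Set.update_nil_left]
      exact PySem.Set.ofList_eq_self_of_nodup _ (List.Nodup.filter _ (PySem.Set.nodup_ofList P))
    have hcont : (((PySem.Set.ofList P).filter (fun km => decide (v km > 1))).foldl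
        (fun d km => d.insert km (v km)) (PySem.Dict.empty : PySem.Dict String Int)).contains km
        = decide (km ∈ (PySem.Set.ofList P).filter (fun km => decide (v km > 1))) := by
      rw [PySem.Dict.contains_eq_decide_mem_keys, hkeys]
    have hofl : PySem.Set.ofList (P ++ [km]) = PySem.Set.add (PySem.Set.ofList P) km :=
      PySem.Set.ofList_append_singleton P km
    have hstep : (if v km > 1 ∧ (((PySem.Set.ofList P).filter (fun km => decide (v km > 1))).foldl
          (fun d km => d.insert km (v km)) (PySem.Dict.empty : PySem.Dict String Int)).contains km = false
        then (((PySem.Set.ofList P).filter (fun km => decide (v km > 1))).foldl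
          (fun d km => d.insert km (v km)) (PySem.Dict.empty : PySem.Dict String Int)).insert km (v km)
        else ((PySem.Set.ofList P).filter (fun km => decide (v km > 1))).foldl
          (fun d km => d.insert km (v km)) (PySem.Dict.empty : PySem.Dict String Int))
        = ((PySem.Set.ofList (P ++ [km])).filter (fun km => decide (v km > 1))).foldl
          (fun d km => d.insert km (v km)) (PySem.Dict.empty : PySem.Dict String Int) := by
      rw [hofl]
      by_cases hin : km ∈ PySem.Set.ofList P
      · rw [PySem.Set.add_of_mem hin]
        by_cases hv : v km > 1
        · have : km ∈ (PySem.Set.ofList P).filter (fun km => decide (v km > 1)) :=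
            List.mem_filter.mpr ⟨hin, by simpa using hv⟩
          rw [if_neg (by rw [hcont]; simp [this])]
        · rw [if_neg (by intro hc; exact hv hc.1)]
      · rw [PySem.Set.add_of_not_mem hin, List.filter_append, List.foldl_append]
        by_cases hv : v km > 1
        · have hnm : km ∉ (PySem.Set.ofList P).filter (fun km => decide (v km > 1)) :=
            fun hc => hin (List.mem_filter.mp hc).1
          rw [if_pos ⟨hv, by rw [hcont]; simpa using hnm⟩]
          simp [hv]
        · rw [if_neg (by intro hc; exact hv hc.1)]
          have : List.filter (fun km => decide (v km > 1)) [km] = [] := by simp [hv]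
          rw [this, List.foldl_nil]
    rw [hstep, ih (P ++ [km]), List.append_assoc]
    rfl

-- ===== VERDICT =====
theorem count_kmer_repeats_spec : Claim_equal_count_kmer_repeats := by
  intro sequences k _
  unfold Spec_count_kmer_repeats
  simp only [count_kmer_repeats, count_kmer_repeats_alt]
  rw [count_kmer_counts_eq_counter, counter_items_filter_gt_one]
  set L := sequences.flatMap (fun s =>
      (PySem.List.pyRange 0 (PySem.Str.len s - k + 1) 1).map
        (fun i => PySem.Str.slice s (some i) (some (i + k)))) with hL
  set U := PySem.List.sorted (PySem.Set.ofList L) (fun km => km) with hU_def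
  have hU : U.Pairwise (· < ·) := PySem.List.sorted_ofList_pairwise_lt L
  have hmemU : ∀ km ∈ L, km ∈ U := by
    intro km hkm
    rw [hU_def, PySem.List.mem_sorted]
    exact (PySem.Set.mem_ofList _ _).mpr hkm
  -- the zero array is U.map (fun _ => 0)
  have hzero : PySem.List.pyRepeat [(0 : Int)] (U.length : Int) = U.map (fun _ => (0 : Int)) := by
    rw [PySem.List.pyRepeat_singleton, Int.toNat_natCast, List.map_const', List.eq_replicate_iff]
    simp
  rw [hzero, phase1 U hU L hmemU (fun _ => (0 : Int))]
  -- each read in the emission pass returns the multiplicity of its k-mer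
  have hread : ∀ km ∈ L, PySem.List.pyGetD (U.map (fun u => 0 + (L.count u : Int)))
      (pvBisectPos U km) 0 = (L.count km : Int) := by
    intro km hkm
    rcases pvBisectPos_spec U km hU (hmemU km hkm) with ⟨j, hj, hjeq, hjval⟩
    rw [hjeq, PySem.List.pyGetD_natCast, List.getD_eq_getElem _ _ (by simpa using hj)]
    simp [hjval]
  have hloop : L.foldl (fun d km =>
        let c := PySem.List.pyGetD (U.map (fun u => 0 + (L.count u : Int))) (pvBisectPos U km) 0
        if c > 1 ∧ d.contains km = false then d.insert km c else d)
        (PySem.Dict.empty : PySem.Dict String Int)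
      = L.foldl (fun d km =>
        if (L.count km : Int) > 1 ∧ d.contains km = false then d.insert km (L.count km : Int) else d)
        (PySem.Dict.empty : PySem.Dict String Int) := by
    apply PySem.List.foldl_congr_mem
    intro d km hkm
    simp only [hread km hkm]
  rw [hloop]
  have hmk := phase2 (fun km => (L.count km : Int)) L []
  simp only [PySem.Set.ofList_nil, List.filter_nil, List.foldl_nil, List.nil_append] at hmk
  rw [hmk]
  rw [PySem.Dict.items_foldl_insert_fresh _ (fun km => km) (fun km => (L.count km : Int)) _
      (by intro a _; simp [PySem.Dict.contains_empty])
      (by simpa using (PySem.Set.nodup_ofList L).filter _)]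
  simp only [List.nil_append, PySem.Dict.empty]
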